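-- pv_equiv track=rewrite | github.com/mariusBRM/Chain-of-though_UCL | src/generation_processing.py | keep_code_until_after_first_comment
-- ===== SOURCE A (Python) =====
-- def keep_code_until_after_first_comment(code):
--     # Split the code into lines
--     code_lines = code.split('\n')
--     # Initialize a list to store the output lines
--     output_lines = []
--     # Initialize a variable to keep track if a comment has been found
--     comment_found = False
--     # Loop over the lines
--     for line in code_lines:
--         # Add the line to the output
--         output_lines.append(line)
--         # If the line starts with a tab followed by a hash and a comment hasn't been found before,
--         # mark that a comment has been found
--         if line.startswith('\t#') and not comment_found:
--             comment_found = True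
--         # If a comment has been found and the current line does not start with a comment, stop adding lines to the output
--         elif comment_found and not line.startswith('\t#'):
--             # need to make a function that keep the structure
--             break
--     # Join the output lines back together with newlines and return the result
--     return '\n'.join(output_lines)
-- ===== SOURCE B (Python) =====
-- def keep_code_until_after_first_comment(code):
--     # Two-phase: locate the comment block's boundaries, then slice.
--     lines = code.split('\n')
--     c = next((i for i, l in enumerate(lines) if l.startswith('\t#')), None)
--     if c is None:
--         return '\n'.join(lines)
--     j = next((i for i in range(c + 1, len(lines))
--               if not lines[i].startswith('\t#')), None)
--     if j is None:
--         return '\n'.join(lines)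
--     return '\n'.join(lines[:j + 1])
-- ===== Notes on version B (the rewrite author's own statement) =====
-- stated objective: alternative
-- what changed: Replaces the single stateful flag-and-break loop with a two-phase scan: find the index of the first '\t#' line, then the first non-comment index after it, and slice the line list there.
import Mathlib
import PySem

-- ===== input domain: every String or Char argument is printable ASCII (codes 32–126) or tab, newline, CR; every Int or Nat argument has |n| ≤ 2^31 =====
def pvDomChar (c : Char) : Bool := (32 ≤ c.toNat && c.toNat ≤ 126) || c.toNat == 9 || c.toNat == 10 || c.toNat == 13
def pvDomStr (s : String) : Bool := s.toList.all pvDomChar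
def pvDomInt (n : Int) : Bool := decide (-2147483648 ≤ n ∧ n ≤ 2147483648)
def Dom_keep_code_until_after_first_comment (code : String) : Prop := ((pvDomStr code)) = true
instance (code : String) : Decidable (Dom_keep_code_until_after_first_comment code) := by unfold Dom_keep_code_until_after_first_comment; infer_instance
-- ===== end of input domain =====

-- B replaces A's stateful flag-and-break loop with a two-phase scan (find the comment block's
-- boundaries, then slice the line list); same cost, different decomposition.


-- ===== PORT A =====
-- A's flag loop: append each line; set the flag on the first '\t#' line; break (after appending
-- the breaking line) on the first non-'\t#' line once the flag is set.
def kcLoopA : List String → Bool → List String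
  | [], _ => []
  | l :: rest, found =>
    l :: (if PySem.Str.startswith l "\t#" && !found then kcLoopA rest true
          else if found && !(PySem.Str.startswith l "\t#") then []
          else kcLoopA rest found)

def keep_code_until_after_first_comment (code : String) : String :=
  let code_lines : List String := (PySem.Chars.splitOn code.toList "\n".toList).map String.ofList
  PySem.Str.join "\n" (kcLoopA code_lines false)

-- ===== PORT B =====
def keep_code_until_after_first_comment_alt (code : String) : String :=
  let lines : List String := (PySem.Chars.splitOn code.toList "\n".toList).map String.ofList
  match lines.findIdx? (fun l => PySem.Str.startswith l "\t#") with
  | none => PySem.Str.join "\n" lines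
  | some c =>
    match (lines.drop (c + 1)).findIdx? (fun l => !(PySem.Str.startswith l "\t#")) with
    | none => PySem.Str.join "\n" lines
    | some k => PySem.Str.join "\n" (lines.take (c + 1 + k + 1))

-- ===== PRECONDITION & SPEC =====
def Spec_keep_code_until_after_first_comment (code : String) (out : String) : Prop := out = keep_code_until_after_first_comment_alt code
instance (code : String) (out : String) : Decidable (Spec_keep_code_until_after_first_comment code out) := by unfold Spec_keep_code_until_after_first_comment; infer_instance

-- ===== CLAIM (what is proved, stated in full; the proofs are below) =====
def Claim_equal_keep_code_until_after_first_comment : Prop := ∀ (code : String), Dom_keep_code_until_after_first_comment code → Spec_keep_code_until_after_first_comment code (keep_code_until_after_first_comment code)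

-- ===== LEMMAS AND PROOFS =====

-- Once A's flag is set, the loop keeps lines up to and including the first non-comment line.
theorem kcLoopA_true (lines : List String) :
    kcLoopA lines true =
      match lines.findIdx? (fun l => !(PySem.Str.startswith l "\t#")) with
      | none => lines
      | some k => lines.take (k + 1) := by
  induction lines with
  | nil => simp [kcLoopA]
  | cons l rest ih =>
    by_cases h : PySem.Chars.startswith l.toList ['\t', '#'] = true
    · simp only [kcLoopA, List.findIdx?_cons, ih]
      simp [h]
      cases hk : List.findIdx? (fun l => !PySem.Chars.startswith l.toList ['\t', '#']) rest <;>
        simp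
    · simp only [kcLoopA, List.findIdx?_cons]
      simp [h]

-- With the flag unset, A's loop computes exactly B's boundaries-then-slice result.
theorem kcLoopA_false (lines : List String) :
    kcLoopA lines false =
      match lines.findIdx? (fun l => PySem.Str.startswith l "\t#") with
      | none => lines
      | some c =>
        match (lines.drop (c + 1)).findIdx? (fun l => !(PySem.Str.startswith l "\t#")) with
        | none => lines
        | some k => lines.take (c + 1 + k + 1) := by
  induction lines with
  | nil => simp [kcLoopA]
  | cons l rest ih =>
    by_cases h : PySem.Chars.startswith l.toList ['\t', '#'] = true
    · simp only [kcLoopA, List.findIdx?_cons, kcLoopA_true]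
      simp [h]
      cases hk : List.findIdx? (fun l => !PySem.Chars.startswith l.toList ['\t', '#']) rest
      · simp
      · simp; omega
    · simp only [kcLoopA, List.findIdx?_cons, ih]
      simp [h]
      cases hc : List.findIdx? (fun l => PySem.Chars.startswith l.toList ['\t', '#']) rest with
      | none => simp
      | some c =>
        simp only [Option.map_some]
        cases hk : List.findIdx? (fun l => !PySem.Chars.startswith l.toList ['\t', '#'])
            (List.drop (c + 1) rest) with
        | none => simp
        | some k =>
          simp
          ring_nf

-- ===== VERDICT (by name: the statement is the Claim_ definition above) =====
theorem keep_code_until_after_first_comment_spec : Claim_equal_keep_code_until_after_first_comment := by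
  intro code _
  unfold Spec_keep_code_until_after_first_comment
  unfold keep_code_until_after_first_comment keep_code_until_after_first_comment_alt
  simp only [kcLoopA_false]
  cases List.findIdx? (fun l => PySem.Str.startswith l "\t#")
      (List.map String.ofList (PySem.Chars.splitOn code.toList "\n".toList)) with
  | none => rfl
  | some c =>
    cases hk : List.findIdx? (fun l => !PySem.Str.startswith l "\t#")
        (List.drop (c + 1) (List.map String.ofList (PySem.Chars.splitOn code.toList "\n".toList))) <;>
      simp only [hk]
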